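-- pv_equiv track=rewrite | github.com/emranbm/Sharif-Fault-Tolerant-Systems-Final-Exam | 2/main.py | _devide_to_subtasks_by_segments
-- ===== SOURCE A (Python) =====
-- from typing import List, Tuple
--
-- TASK_WCET = 10
--
-- def _devide_to_subtasks_by_segments(task_time: int, segments: List[int]) -> List[int]:
--     assert sum(
--         s for s in segments) == TASK_WCET, f"Sum segments is not equal to WCET ({TASK_WCET})"
--     remained_time = task_time
--     subtasks = []
--     for s in segments:
--         if remained_time >= s:
--             subtasks.append(s)
--             remained_time -= s
--         else:
--             subtasks.append(remained_time)
--             remained_time = 0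
--             break
--     assert remained_time == 0, f"Unexpected remained time: {remained_time} (total: {task_time})"
--     return subtasks
-- ===== SOURCE B (Python) =====
-- from typing import List
-- from itertools import accumulate
--
-- TASK_WCET = 10
--
-- def _devide_to_subtasks_by_segments(task_time: int, segments: List[int]) -> List[int]:
--     assert sum(
--         s for s in segments) == TASK_WCET, f"Sum segments is not equal to WCET ({TASK_WCET})"
--     prefixes = list(accumulate(segments, initial=0))
--     for i, p in enumerate(prefixes[1:]):
--         if p > task_time:
--             return segments[:i] + [task_time - prefixes[i]]
--     remained_time = task_time - TASK_WCET
--     assert remained_time == 0, f"Unexpected remained time: {remained_time} (total: {task_time})"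
--     return list(segments)
-- ===== Notes on version B (the rewrite author's own statement) =====
-- stated objective: alternative
-- what changed: Replaces the incremental greedy accumulator loop with a precomputed prefix-sum table: the cut point is the first prefix sum exceeding task_time and the result is a slice plus one computed remainder.
import Mathlib
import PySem

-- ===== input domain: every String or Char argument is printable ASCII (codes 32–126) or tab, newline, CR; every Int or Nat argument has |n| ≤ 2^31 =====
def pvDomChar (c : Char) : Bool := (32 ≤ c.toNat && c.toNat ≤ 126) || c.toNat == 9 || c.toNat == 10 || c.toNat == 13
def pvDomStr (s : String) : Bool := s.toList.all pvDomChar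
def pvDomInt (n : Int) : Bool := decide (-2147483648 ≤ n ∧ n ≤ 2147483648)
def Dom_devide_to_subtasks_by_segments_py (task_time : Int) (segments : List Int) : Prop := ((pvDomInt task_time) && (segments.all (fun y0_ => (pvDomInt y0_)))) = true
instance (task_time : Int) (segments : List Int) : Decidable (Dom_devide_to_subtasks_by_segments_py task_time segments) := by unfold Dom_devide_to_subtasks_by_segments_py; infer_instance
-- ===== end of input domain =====

-- B replaces A's incremental greedy accumulator loop with a prefix-sum table, a scan
-- for the first prefix exceeding task_time, and a slice; same return value on Pre_.

-- ===== PORT A =====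
-- the for-loop of A: state (remained_time, subtasks); returns the subtasks list
-- (the final 'assert remained_time == 0' is covered by Pre_, which excludes failing inputs)
def pyALoop (remained : Int) (subtasks : List Int) : List Int → List Int
  | [] => subtasks
  | s :: rest =>
    if remained ≥ s then pyALoop (remained - s) (subtasks ++ [s]) rest
    else subtasks ++ [remained]   -- append remained_time; remained_time = 0; break

def devide_to_subtasks_by_segments_py (task_time : Int) (segments : List Int) : List Int :=
  pyALoop task_time [] segments

-- ===== PORT B =====
-- 'for i, p in enumerate(prefixes[1:]): if p > task_time: return ...' — find the first index
def pyBFind (task_time : Int) (i : Nat) : List Int → Option Nat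
  | [] => none
  | p :: rest => if p > task_time then some i else pyBFind task_time (i + 1) rest

def devide_to_subtasks_by_segments_py_alt (task_time : Int) (segments : List Int) : List Int :=
  let prefixes := List.scanl (· + ·) 0 segments     -- accumulate(segments, initial=0)
  match pyBFind task_time 0 (prefixes.drop 1) with
  | some i => segments.take i ++ [task_time - prefixes.getD i 0]
  | none => segments                                 -- return list(segments)

-- ===== PRECONDITION & SPEC =====
-- Pre_ excludes exactly the inputs on which A's asserts raise: sum(segments) ≠ 10, or the
-- loop runs off the end with remained_time ≠ 0 (no prefix sum exceeds task_time and task_time ≠ 10).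
def Pre_devide_to_subtasks_by_segments_py (task_time : Int) (segments : List Int) : Prop :=
  segments.sum = 10 ∧
    (task_time = 10 ∨ ∃ i < segments.length, task_time < (segments.take (i + 1)).sum)
instance (task_time : Int) (segments : List Int) : Decidable (Pre_devide_to_subtasks_by_segments_py task_time segments) := by unfold Pre_devide_to_subtasks_by_segments_py; infer_instance

def pvWitness_devide_to_subtasks_by_segments_py : Int × List Int := (4, [3, 3, 4])

def Spec_devide_to_subtasks_by_segments_py (task_time : Int) (segments : List Int) (out : List Int) : Prop := out = devide_to_subtasks_by_segments_py_alt task_time segments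
instance (task_time : Int) (segments : List Int) (out : List Int) : Decidable (Spec_devide_to_subtasks_by_segments_py task_time segments out) := by unfold Spec_devide_to_subtasks_by_segments_py; infer_instance

-- ===== CLAIM (what is proved, stated in full; the proofs are below) =====
def Claim_equal_devide_to_subtasks_by_segments_py : Prop := ∀ (task_time : Int) (segments : List Int), Dom_devide_to_subtasks_by_segments_py task_time segments → Pre_devide_to_subtasks_by_segments_py task_time segments → Spec_devide_to_subtasks_by_segments_py task_time segments (devide_to_subtasks_by_segments_py task_time segments)

-- ===== LEMMAS AND PROOFS =====

-- common reference function: greedy split, written structurally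
def pvSimple (t : Int) : List Int → List Int
  | [] => []
  | s :: rest => if t ≥ s then s :: pvSimple (t - s) rest else [t]

theorem pyALoop_eq_simple (xs : List Int) : ∀ (t : Int) (acc : List Int),
    pyALoop t acc xs = acc ++ pvSimple t xs := by
  induction xs with
  | nil => intro t acc; simp [pyALoop, pvSimple]
  | cons s rest ih =>
    intro t acc
    by_cases h : t ≥ s
    · simp [pyALoop, pvSimple, h, ih]
    · simp [pyALoop, pvSimple, h]

theorem scanl_getD (xs : List Int) : ∀ (c : Int) (i : Nat), i ≤ xs.length →
    (List.scanl (· + ·) c xs).getD i 0 = c + (xs.take i).sum := by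
  induction xs with
  | nil =>
    intro c i h
    have : i = 0 := Nat.le_zero.mp (by simpa using h)
    subst this; simp [List.scanl_nil]
  | cons x rest ih =>
    intro c i h
    cases i with
    | zero => simp [List.scanl_cons]
    | succ j =>
      simp only [List.scanl_cons, List.getD_cons_succ, List.take_succ_cons, List.sum_cons]
      rw [ih (c + x) j (by simpa using h)]
      ring

theorem pyB_key (xs : List Int) : ∀ (segs : List Int) (i : Nat) (t c : Int),
    segs.drop i = xs → c = (segs.take i).sum →
    (match pyBFind t i ((List.scanl (· + ·) c xs).drop 1) with
     | some j => segs.take j ++ [t - (List.scanl (· + ·) 0 segs).getD j 0]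
     | none => segs)
    = segs.take i ++ pvSimple (t - c) xs := by
  induction xs with
  | nil =>
    intro segs i t c hdrop _
    have hlen : segs.length ≤ i := List.drop_eq_nil_iff.mp hdrop
    simp [List.scanl_nil, pyBFind, pvSimple, List.take_of_length_le hlen]
  | cons x rest ih =>
    intro segs i t c hdrop hc
    have hi : i < segs.length := by
      by_contra h
      have : segs.drop i = [] := List.drop_eq_nil_iff.mpr (by omega)
      simp [this] at hdrop
    have hget : segs[i]? = some x := by
      have h0 : (segs.drop i)[0]? = some x := by rw [hdrop]; rfl
      rw [List.getElem?_drop] at h0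
      simpa using h0
    simp only [List.scanl_cons, List.drop_one, List.tail_cons]
    have hhead : List.scanl (· + ·) (c + x) rest = (c + x) :: (List.scanl (· + ·) (c + x) rest).drop 1 := by
      cases rest <;> simp [List.scanl_nil, List.scanl_cons]
    rw [hhead]
    by_cases hgt : c + x > t
    · -- break here: pyBFind returns some i
      simp only [pyBFind, if_pos hgt]
      have hgetD : (List.scanl (· + ·) 0 segs).getD i 0 = (segs.take i).sum := by
        rw [scanl_getD segs 0 i (le_of_lt hi)]; ring
      have hsimple : pvSimple (t - c) (x :: rest) = [t - c] := by
        simp [pvSimple]; intro h; omega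
      rw [hsimple, hgetD, ← hc]
    · -- take x: recurse at i+1
      simp only [pyBFind, if_neg hgt]
      have hdrop' : segs.drop (i + 1) = rest := by
        have : segs.drop (i + 1) = List.drop 1 (segs.drop i) := by
          rw [List.drop_drop]
        rw [this, hdrop]; rfl
      have htake : segs.take (i + 1) = segs.take i ++ [x] := by
        rw [List.take_add_one, hget]; rfl
      have hc' : c + x = (segs.take (i + 1)).sum := by
        rw [htake]; simp [hc]
      have := ih segs (i + 1) t (c + x) hdrop' hc'
      rw [this, htake]
      have hsimple : pvSimple (t - c) (x :: rest) = x :: pvSimple (t - c - x) rest := by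
        simp [pvSimple]; intro h; omega
      rw [hsimple]
      simp only [List.append_assoc, List.cons_append, List.nil_append]
      congr 2
      ring_nf

theorem pyB_eq_simple (t : Int) (segs : List Int) :
    devide_to_subtasks_by_segments_py_alt t segs = pvSimple t segs := by
  have := pyB_key segs segs 0 t 0 (by simp) (by simp)
  simpa [devide_to_subtasks_by_segments_py_alt] using this

-- ===== VERDICT (by name: the statement is the Claim_ definition above) =====
theorem devide_to_subtasks_by_segments_py_spec : Claim_equal_devide_to_subtasks_by_segments_py := by
  intro t segs _ _
  unfold Spec_devide_to_subtasks_by_segments_py devide_to_subtasks_by_segments_py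
  rw [pyB_eq_simple, pyALoop_eq_simple]
  simp
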